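-- pv_equiv track=rewrite | github.com/ThaDome23/unical_fondprog1_dj | sol/R4.py | cerca
-- ===== SOURCE A (Python) =====
-- def cerca(x, lista, N)->int:
--     if x == 0: return 0
--     conta =0
--     for i in range(N):
--         if lista[i] == x:
--             lista[i] = 0
--             conta+=1
--     return conta + cerca(conta,lista,N)
-- ===== SOURCE B (Python) =====
-- def cerca(x, lista, N):
--     # One-pass frequency table, then follow the value->count chain by dict pops.
--     # Note: unlike A, this does not mutate lista (equivalence is about the return value).
--     freq = {}
--     for v in lista[:max(N, 0)]:
--         freq[v] = freq.get(v, 0) + 1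
--     total = 0
--     cur = x
--     while cur != 0:
--         cur = freq.pop(cur, 0)
--         total += cur
--     return total
-- ===== Notes on version B (the rewrite author's own statement) =====
-- stated objective: alternative
-- what changed: A recursively rescans the prefix, zeroing matches and re-searching for the running count; B instead builds a frequency dict of the prefix in one pass and follows the value->count chain by popping each visited key, never touching the list again (and never mutating it).
import Mathlib
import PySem

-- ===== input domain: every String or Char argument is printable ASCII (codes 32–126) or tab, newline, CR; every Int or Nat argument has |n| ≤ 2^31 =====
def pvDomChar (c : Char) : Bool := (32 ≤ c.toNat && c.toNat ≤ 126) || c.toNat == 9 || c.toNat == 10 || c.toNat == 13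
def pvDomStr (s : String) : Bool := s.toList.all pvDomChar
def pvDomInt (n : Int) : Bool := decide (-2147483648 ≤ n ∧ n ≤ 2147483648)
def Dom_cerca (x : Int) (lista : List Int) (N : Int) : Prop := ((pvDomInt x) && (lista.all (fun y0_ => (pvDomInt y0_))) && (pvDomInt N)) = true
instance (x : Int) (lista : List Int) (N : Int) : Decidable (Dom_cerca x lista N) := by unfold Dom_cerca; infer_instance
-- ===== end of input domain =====

-- B replaces A's repeated zero-and-rescan recursion by one frequency dict and a value→count chain
-- (return value only: A zeroes matched entries of `lista` in place, B does not mutate it).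

-- ===== PORT A =====
-- the for-loop of A: walks the first N positions, zeroing matches of x and counting them
def cercaLoop (x : Int) : List Int → Int → List Int × Int
  | l, n =>
    if n ≤ 0 then (l, 0)
    else
      match l with
      | [] => ([], 0)          -- Python raises IndexError here (N > len); excluded by Pre_cerca
      | a :: t =>
        let p := cercaLoop x t (n - 1)
        if a = x then (0 :: p.1, p.2 + 1) else (a :: p.1, p.2)

-- facts about cercaLoop needed by cerca's termination proof
theorem cercaLoop_snd_nonneg (x : Int) : ∀ (l : List Int) (n : Int), 0 ≤ (cercaLoop x l n).2 := by
  intro l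
  induction l with
  | nil => intro n; rw [cercaLoop]; split <;> simp
  | cons a t ih =>
    intro n; rw [cercaLoop]
    split
    · simp
    · have h2 := ih (n - 1)
      split <;> simp <;> omega

theorem cercaLoop_snd_zero (x : Int) : ∀ (l : List Int) (n : Int),
    (cercaLoop x l n).2 = 0 → (cercaLoop x l n).1 = l := by
  intro l
  induction l with
  | nil => intro n; rw [cercaLoop]; split <;> simp
  | cons a t ih =>
    intro n; rw [cercaLoop]
    split
    · simp
    · split
      next h =>
        intro hc
        exfalso
        have := cercaLoop_snd_nonneg x t (n - 1)
        simp at hc; omega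
      next h =>
        intro hc
        simp at hc ⊢
        exact ih (n - 1) hc

theorem cercaLoop_countNZ (x : Int) (hx : x ≠ 0) : ∀ (l : List Int) (n : Int),
    (cercaLoop x l n).1.countP (fun a => !(a == 0)) + (cercaLoop x l n).2.toNat
      = l.countP (fun a => !(a == 0)) := by
  intro l
  induction l with
  | nil => intro n; rw [cercaLoop]; split <;> simp
  | cons a t ih =>
    intro n; rw [cercaLoop]
    split
    · simp
    · have hnn := cercaLoop_snd_nonneg x t (n - 1)
      have ht := ih (n - 1)
      split
      next h =>
        have ha : ¬ a = 0 := by rw [h]; exact hx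
        simp [List.countP_cons, ha]
        omega
      next h =>
        by_cases ha : a = 0 <;> simp [List.countP_cons, ha] <;> omega

-- port of A: count matches of x in the first N slots, zero them, recurse on the count
def cerca (x : Int) (lista : List Int) (N : Int) : Int :=
  if x = 0 then 0
  else
    let p := cercaLoop x lista N
    p.2 + cerca p.2 p.1 N
termination_by lista.countP (fun a => !(a == 0)) + (if x = 0 then 0 else 1)
decreasing_by
  have hnn := cercaLoop_snd_nonneg x lista N
  have hnz := cercaLoop_countNZ x (by assumption) lista N
  by_cases hz : (cercaLoop x lista N).2 = 0
  · rw [cercaLoop_snd_zero x lista N hz]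
    simp_all
  · simp only [if_neg hz, if_neg (by assumption : ¬ x = 0)]
    omega

-- ===== PORT B =====
-- facts about Dict.erase needed by cercaAltLoop's termination proof
theorem dict_size_erase_le (d : PySem.Dict Int Int) (k : Int) : (d.erase k).size ≤ d.size := by
  simp [PySem.Dict.erase, PySem.Dict.size]
  exact List.length_filter_le _ _

theorem dict_size_erase_lt (d : PySem.Dict Int Int) (k : Int) (h : d.contains k = true) :
    (d.erase k).size < d.size := by
  have h' : ∃ p ∈ d.items, (p.1 == k) = true := by
    simpa [PySem.Dict.contains, List.any_eq_true] using h
  obtain ⟨p, hm, he⟩ := h'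
  simp only [PySem.Dict.erase, PySem.Dict.size]
  exact List.length_filter_lt_length_iff_exists.mpr ⟨p, hm, by simp [he]⟩

-- the while-loop of B: follow the value → count chain, popping each visited key
def cercaAltLoop (freq : PySem.Dict Int Int) (cur total : Int) : Int :=
  if cur = 0 then total
  else
    let c := freq.getD cur 0
    cercaAltLoop (freq.erase cur) c (total + c)
termination_by freq.size + (if cur = 0 then 0 else 1)
decreasing_by
  by_cases hc : freq.contains cur
  · have := dict_size_erase_lt freq cur hc
    split <;> omega
  · have hcf : freq.contains cur = false := by simpa using hc
    have h0 : freq.getD cur 0 = 0 := PySem.Dict.getD_of_not_contains freq 0 hcf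
    have hle := dict_size_erase_le freq cur
    have h1 : (if freq.getD cur 0 = 0 then (0:Nat) else 1) = 0 := by simp [h0]
    rw [h1]
    split <;> omega

-- frequency dict of the first max(N,0) elements (lista[:max(N,0)]; the bound is ≥ 0, so the
-- slice is exactly `take`)
def cercaFreq (lista : List Int) (N : Int) : PySem.Dict Int Int :=
  (lista.take (max N 0).toNat).foldl (fun d v => d.insert v (d.getD v 0 + 1)) PySem.Dict.empty

-- port of B
def cerca_alt (x : Int) (lista : List Int) (N : Int) : Int :=
  cercaAltLoop (cercaFreq lista N) x 0

-- ===== PRECONDITION & SPEC =====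
-- Pre_ excludes exactly the inputs on which A raises IndexError: x ≠ 0 together with N > len(lista)
def Pre_cerca (x : Int) (lista : List Int) (N : Int) : Prop :=
  x = 0 ∨ N ≤ (lista.length : Int)
instance (x : Int) (lista : List Int) (N : Int) : Decidable (Pre_cerca x lista N) := by
  unfold Pre_cerca; infer_instance

def pvWitness_cerca : Int × List Int × Int := (1, [1, 2, 1], 3)

def Spec_cerca (x : Int) (lista : List Int) (N : Int) (out : Int) : Prop := out = cerca_alt x lista N
instance (x : Int) (lista : List Int) (N : Int) (out : Int) : Decidable (Spec_cerca x lista N out) := by unfold Spec_cerca; infer_instance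

-- ===== CLAIM (what is proved, stated in full; the proofs are below) =====
def Claim_equal_cerca : Prop := ∀ (x : Int) (lista : List Int) (N : Int), Dom_cerca x lista N → Pre_cerca x lista N → Spec_cerca x lista N (cerca x lista N)

-- ===== LEMMAS AND PROOFS =====

theorem find?_filter_ne (k k' : Int) (h : k' ≠ k) : ∀ (items : List (Int × Int)),
    List.find? (fun p => p.1 == k') (items.filter (fun p => !(p.1 == k)))
      = List.find? (fun p => p.1 == k') items := by
  intro items
  induction items with
  | nil => rfl
  | cons p t ih =>
    by_cases hk : p.1 = k
    · have hp : (p.1 == k') = false := by simp [hk, Ne.symm h]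
      have hkk : (k == k') = false := by simp [Ne.symm h]
      simp [List.filter_cons, List.find?_cons, hk, hp, hkk, ih]
    · by_cases hp : p.1 = k'
      · simp [List.filter_cons, List.find?_cons, hk, hp, h]
      · simp [List.filter_cons, List.find?_cons, hk, hp, ih]

theorem find?_filter_self (k : Int) : ∀ (items : List (Int × Int)),
    List.find? (fun p => p.1 == k) (items.filter (fun p => !(p.1 == k))) = none := by
  intro items
  rw [List.find?_eq_none]
  intro p hp
  have h2 := List.of_mem_filter hp
  simpa using h2

theorem getD_erase_self (d : PySem.Dict Int Int) (k v : Int) :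
    (d.erase k).getD k v = v := by
  simp only [PySem.Dict.erase, PySem.Dict.getD, PySem.Dict.get?]
  rw [find?_filter_self]
  rfl

theorem getD_erase_of_ne (d : PySem.Dict Int Int) (k k' : Int) (h : k' ≠ k) (v : Int) :
    (d.erase k).getD k' v = d.getD k' v := by
  simp only [PySem.Dict.erase, PySem.Dict.getD, PySem.Dict.get?]
  rw [find?_filter_ne k k' h]

theorem cercaFreq_getD (lista : List Int) (N : Int) (k : Int) :
    (cercaFreq lista N).getD k 0 = ((lista.take (max N 0).toNat).count k : Int) := by
  unfold cercaFreq
  rw [PySem.Dict.getD_foldl_insert_add_one]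
  simp [PySem.Dict.getD_empty]

-- characterization of A's scan under the precondition N ≤ len
theorem cercaLoop_spec (x : Int) : ∀ (l : List Int) (N : Int), N ≤ (l.length : Int) →
    (cercaLoop x l N).1
        = (l.take (max N 0).toNat).map (fun a => if a = x then 0 else a)
            ++ l.drop (max N 0).toNat
      ∧ (cercaLoop x l N).2 = ((l.take (max N 0).toNat).count x : Int) := by
  intro l
  induction l with
  | nil =>
    intro N hN
    simp at hN
    rw [cercaLoop]
    have : (max N 0).toNat = 0 := by omega
    simp [this, if_pos (by omega : N ≤ 0)]
  | cons a t ih =>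
    intro N hN
    rw [cercaLoop]
    by_cases h0 : N ≤ 0
    · have : (max N 0).toNat = 0 := by omega
      simp [this, if_pos h0]
    · simp only [if_neg h0]
      have hn : (max N 0).toNat = N.toNat := by omega
      have hn1 : (max (N - 1) 0).toNat = N.toNat - 1 := by omega
      have htk : (a :: t).take (max N 0).toNat = a :: t.take (max (N - 1) 0).toNat := by
        rw [hn, hn1]
        cases hNt : N.toNat with
        | zero => omega
        | succ m => simp [hNt]
      have hdr : (a :: t).drop (max N 0).toNat = t.drop (max (N - 1) 0).toNat := by
        rw [hn, hn1]
        cases hNt : N.toNat with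
        | zero => omega
        | succ m => simp [hNt]
      have iht := ih (N - 1) (by simp at hN ⊢; omega)
      rw [htk, hdr]
      split
      next hax =>
        subst hax
        simp [List.count_cons, iht.1, iht.2]
      next hax =>
        simp [List.count_cons, hax, iht.1, iht.2, Ne.symm]

theorem count_map_zeroed (x k : Int) (hk : k ≠ 0) : ∀ (m : List Int),
    (m.map (fun a => if a = x then 0 else a)).count k
      = if k = x then 0 else m.count k := by
  intro m
  induction m with
  | nil => simp
  | cons a t ih =>
    simp only [List.map_cons, List.count_cons, ih]
    by_cases hkx : k = x
    · subst hkx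
      by_cases hax : a = k <;> simp [hax, hk, Ne.symm hk]
    · by_cases hax : a = x
      · have hxk : x ≠ k := fun h2 => hkx h2.symm
        simp [hax, hkx, hxk, Ne.symm hk]
      · simp [hax, hkx]

-- congruence for B's while-loop: only lookups at nonzero keys matter
theorem cercaAltLoop_congr : ∀ (d1 : PySem.Dict Int Int) (cur total : Int)
    (d2 : PySem.Dict Int Int),
    (∀ k : Int, k ≠ 0 → d1.getD k 0 = d2.getD k 0) →
    cercaAltLoop d1 cur total = cercaAltLoop d2 cur total := by
  intro d1 cur total
  induction d1, cur, total using cercaAltLoop.induct with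
  | case1 d total =>
    intro d2 h
    conv_rhs => rw [cercaAltLoop]
    rw [cercaAltLoop]
    simp
  | case2 d cur total hcur c ih =>
    intro d2 h
    rw [cercaAltLoop]
    conv_rhs => rw [cercaAltLoop]
    simp only [if_neg hcur]
    rw [← h cur hcur]
    apply ih
    intro k hk
    by_cases hkc : k = cur
    · subst hkc; rw [getD_erase_self, getD_erase_self]
    · rw [getD_erase_of_ne _ _ _ hkc, getD_erase_of_ne _ _ _ hkc]
      exact h k hk

theorem cerca_main : ∀ (x : Int) (l : List Int) (N : Int),
    (x = 0 ∨ N ≤ (l.length : Int)) → ∀ total : Int,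
    cercaAltLoop (cercaFreq l N) x total = total + cerca x l N := by
  intro x l N
  induction x, l using cerca.induct (N := N) with
  | case1 l =>
    intro _ total
    rw [cercaAltLoop, cerca]
    simp
  | case2 x l hx p ih =>
    intro hpre total
    have hpeq : p = cercaLoop x l N := rfl
    rw [hpeq] at ih
    have hN : N ≤ (l.length : Int) := by
      cases hpre with
      | inl h => exact absurd h hx
      | inr h => exact h
    obtain ⟨hfst, hsnd⟩ := cercaLoop_spec x l N hN
    have hlen : ((cercaLoop x l N).1.length : Int) = (l.length : Int) := by
      rw [hfst]
      simp
      omega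
    rw [cerca]
    simp only [if_neg hx]
    rw [cercaAltLoop]
    simp only [if_neg hx]
    rw [cercaFreq_getD, ← hsnd]
    have htake : (cercaLoop x l N).1.take (max N 0).toNat
        = (l.take (max N 0).toNat).map (fun a => if a = x then 0 else a) := by
      rw [hfst, List.take_append_of_le_length]
      · rw [List.take_of_length_le]
        simp
      · simp
        omega
    have hcong : cercaAltLoop ((cercaFreq l N).erase x) (cercaLoop x l N).2
        (total + (cercaLoop x l N).2)
        = cercaAltLoop (cercaFreq (cercaLoop x l N).1 N) (cercaLoop x l N).2
        (total + (cercaLoop x l N).2) := by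
      apply cercaAltLoop_congr
      intro k hk
      by_cases hkx : k = x
      · rw [hkx, getD_erase_self, cercaFreq_getD, htake, count_map_zeroed x x hx]
        simp
      · rw [getD_erase_of_ne _ _ _ hkx, cercaFreq_getD, cercaFreq_getD]
        rw [htake, count_map_zeroed _ _ hk]
        simp [hkx]
    rw [hcong]
    have hplen : N ≤ ((cercaLoop x l N).1.length : Int) := by omega
    rw [ih (Or.inr hplen) (total + (cercaLoop x l N).2)]
    ring

-- ===== VERDICT (by name: the statement is the Claim_ definition above) =====
theorem cerca_spec : Claim_equal_cerca := by
  intro x lista N _ hpre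
  unfold Spec_cerca
  unfold cerca_alt
  have := cerca_main x lista N hpre 0
  rw [this]
  ring
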